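-- pv_equiv track=rewrite | github.com/negreskul/wide_nets | hamming_code/lab1_client.py | string_formating
-- ===== SOURCE A (Python) =====
-- def string_formating(input_str, word_length):
--     binary_str = ''.join([bin(ord(i))[2:].zfill(8) for i in input_str])
--     words_list = ['']
--     leng = len(binary_str)
--     zeros = bin(word_length - leng%word_length) if leng%word_length!=0 else bin(0)
--     for i in range(0, word_length - len(zeros) + 2):
--         words_list[0] += '0'
--     for i in range(2, len(zeros)):
--         words_list[0] += zeros[i]
--     for i in range(0, leng, word_length):
--         words_list.append('')
--         for j in range(i, i + min(word_length, leng-i)):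
--             words_list[i//word_length + 1] += binary_str[j]
--     end = leng//word_length+1 if leng%word_length!=0 else leng//word_length
--     while len(words_list[end]) < word_length:
--         words_list[end] += '0'
--     return words_list
-- ===== SOURCE B (Python) =====
-- def string_formating(input_str, word_length):
--     binary_str = ''.join(format(ord(c), '08b') for c in input_str)
--     padding = (-len(binary_str)) % word_length
--     header = bin(padding)[2:].zfill(word_length)
--     padded = binary_str + '0' * padding
--     chunks = [padded[i:i + word_length] for i in range(0, len(padded), word_length)]
--     return [header] + chunks
-- ===== Notes on version B (the rewrite author's own statement) =====
-- stated objective: simpler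
-- what changed: B computes the padding amount up front with (-len)%word_length, builds the header with zfill instead of two char-by-char append loops, pads the bit string once and slices it into word_length-sized chunks, replacing A's chunk-then-pad-last-word loop with interleaved index bookkeeping and a trailing while loop.
-- outside the precondition, e.g. on string_formating('a', -5): A returns ['b11'], B returns ['b11']; on string_formating('ab', -5): A raises IndexError, B returns ['b1']
import Mathlib
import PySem

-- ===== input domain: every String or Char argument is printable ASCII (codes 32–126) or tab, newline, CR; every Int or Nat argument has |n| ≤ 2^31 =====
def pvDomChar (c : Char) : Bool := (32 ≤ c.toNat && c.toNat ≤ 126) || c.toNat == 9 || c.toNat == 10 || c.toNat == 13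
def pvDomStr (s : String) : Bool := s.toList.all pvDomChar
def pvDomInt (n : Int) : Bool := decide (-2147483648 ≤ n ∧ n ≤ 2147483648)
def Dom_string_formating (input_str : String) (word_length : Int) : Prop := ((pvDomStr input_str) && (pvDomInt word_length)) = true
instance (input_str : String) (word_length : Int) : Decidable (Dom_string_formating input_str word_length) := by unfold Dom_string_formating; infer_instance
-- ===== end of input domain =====

/- B pads the bit string once up front ((-len) % word_length) and slices it into word_length-sized
   chunks, with the header built by zfill, replacing A's interleaved chunk-then-pad-last-word loops
   (objective: simpler). -/


-- ===== PORT A =====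
-- helper for Python's 'words_list[idx] += cs' (index resolved with Python's rules;
-- out of range would be an IndexError in Python — it is a no-op here and unreached inside Pre_)
def pyAddAt (ws : List (List Char)) (idx : Int) (cs : List Char) : List (List Char) :=
  match PySem.List.pyIdx? ws.length idx with
  | some k => ws.set k (ws.getD k [] ++ cs)
  | none => ws

-- the trailing 'while len(words_list[end]) < word_length: words_list[end] += "0"'
def padZeros (wl : Int) (w : List Char) : List Char :=
  if _h : (w.length : Int) < wl then padZeros wl (w ++ ['0']) else w
  termination_by (wl - w.length).toNat
  decreasing_by simp only [List.length_append, List.length_cons, List.length_nil]; omega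

def string_formating (input_str : String) (word_length : Int) : List String :=
  let binary_str : List Char :=
    (input_str.toList.map (fun i =>
      PySem.Chars.zfill (PySem.List.slice (PySem.Int.toBinChars0b (Int.ofNat i.toNat)) (some 2) none) 8)).flatten
  let leng : Int := binary_str.length
  let zeros : List Char :=
    if PySem.Int.mod leng word_length ≠ 0 then
      PySem.Int.toBinChars0b (word_length - PySem.Int.mod leng word_length)
    else PySem.Int.toBinChars0b 0
  let ws1 := (PySem.List.pyRange 0 (word_length - (zeros.length : Int) + 2) 1).foldl
      (fun ws _ => pyAddAt ws 0 ['0']) [[]]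
  let ws2 := (PySem.List.pyRange 2 (zeros.length : Int) 1).foldl
      (fun ws i => pyAddAt ws 0 [PySem.List.pyGetD zeros i ' ']) ws1
  let ws3 := (PySem.List.pyRange 0 leng word_length).foldl
      (fun ws i =>
        (PySem.List.pyRange i (i + min word_length (leng - i)) 1).foldl
          (fun ws' j => pyAddAt ws' (PySem.Int.floordiv i word_length + 1)
             [PySem.List.pyGetD binary_str j ' ']) (ws ++ [[]])) ws2
  let endi : Int := if PySem.Int.mod leng word_length ≠ 0
      then PySem.Int.floordiv leng word_length + 1 else PySem.Int.floordiv leng word_length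
  let ws4 := match PySem.List.pyIdx? ws3.length endi with
    | some k => ws3.set k (padZeros word_length (ws3.getD k []))
    | none => ws3
  ws4.map String.ofList

-- ===== PORT B =====
def string_formating_alt (input_str : String) (word_length : Int) : List String :=
  let binary_str : List Char :=
    (input_str.toList.map (fun c =>
      PySem.Chars.zfill (PySem.Int.toBinChars (Int.ofNat c.toNat)) 8)).flatten
  let padding : Int := PySem.Int.mod (-(binary_str.length : Int)) word_length
  let header : List Char :=
    PySem.Chars.zfill (PySem.List.slice (PySem.Int.toBinChars0b padding) (some 2) none) word_length
  let padded : List Char := binary_str ++ PySem.List.pyRepeat ['0'] padding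
  let chunks := (PySem.List.pyRange 0 (padded.length : Int) word_length).map
      (fun i => PySem.List.slice padded (some i) (some (i + word_length)))
  (header :: chunks).map String.ofList

-- ===== PRECONDITION & SPEC =====
-- Pre_ restricts to the natural domain of positive word lengths: word_length = 0 makes A (and B)
-- raise ZeroDivisionError, and for word_length < 0 A either raises IndexError or returns an
-- accidental header-only list — a degenerate corner outside the function's purpose.
def Pre_string_formating (input_str : String) (word_length : Int) : Prop :=
  1 ≤ word_length
instance (input_str : String) (word_length : Int) : Decidable (Pre_string_formating input_str word_length) := by unfold Pre_string_formating; infer_instance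
def pvWitness_string_formating : String × Int := ("Hi", 5)

def Spec_string_formating (input_str : String) (word_length : Int) (out : List String) : Prop := out = string_formating_alt input_str word_length
instance (input_str : String) (word_length : Int) (out : List String) : Decidable (Spec_string_formating input_str word_length out) := by unfold Spec_string_formating; infer_instance

-- ===== CLAIM (what is proved, stated in full; the proofs are below) =====
def Claim_equal_string_formating : Prop := ∀ (input_str : String) (word_length : Int), Dom_string_formating input_str word_length → Pre_string_formating input_str word_length → Spec_string_formating input_str word_length (string_formating input_str word_length)

-- ===== LEMMAS AND PROOFS =====
-- ===== auxiliary lemmas =====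

theorem padZeros_eq (wl : Int) (w : List Char) :
    padZeros wl w = w ++ List.replicate (wl - w.length).toNat '0' := by
  obtain ⟨n, hn⟩ : ∃ n, (wl - (w.length : Int)).toNat = n := ⟨_, rfl⟩
  induction n generalizing w with
  | zero =>
    unfold padZeros
    rw [dif_neg (by omega)]
    rw [hn, List.replicate_zero, List.append_nil]
  | succ n ih =>
    unfold padZeros
    rw [dif_pos (by omega)]
    rw [ih (w ++ ['0']) (by simp; omega)]
    have h2 : (wl - (w.length : Int)).toNat = (wl - ((w ++ ['0']).length : Int)).toNat + 1 := by
      simp; omega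
    rw [h2, List.replicate_succ, List.append_assoc]
    rfl

theorem pyAddAt_last (ws0 : List (List Char)) (w cs : List Char) :
    pyAddAt (ws0 ++ [w]) (ws0.length : Int) cs = ws0 ++ [w ++ cs] := by
  unfold pyAddAt
  have h1 : PySem.List.pyIdx? (ws0 ++ [w]).length (ws0.length : Int) = some ws0.length := by
    simp [PySem.List.pyIdx?]
  rw [h1]
  simp [List.getD_eq_getElem?_getD, List.set_append_right]

theorem foldl_addAt_last (l : List Int) (g : Int → Char) :
    ∀ (ws0 : List (List Char)) (w : List Char),
    l.foldl (fun ws j => pyAddAt ws (ws0.length : Int) [g j]) (ws0 ++ [w])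
      = ws0 ++ [w ++ l.map g] := by
  induction l with
  | nil => simp
  | cons x xs ih =>
    intro ws0 w
    simp only [List.foldl_cons, pyAddAt_last, List.map_cons]
    rw [ih ws0 (w ++ [g x])]
    simp

theorem foldl_addAt0 (l : List Int) (g : Int → Char) (w : List Char) :
    l.foldl (fun ws j => pyAddAt ws 0 [g j]) [w] = [w ++ l.map g] := by
  have := foldl_addAt_last l g [] w
  simpa using this

theorem seg_eq (xs : List Char) (d : Char) (a b : Int) (h0 : 0 ≤ a)
    (hb : b ≤ (xs.length : Int)) :
    (PySem.List.pyRange a b 1).map (fun j => PySem.List.pyGetD xs j d)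
      = (xs.drop a.toNat).take (b - a).toNat := by
  rw [PySem.List.pyRange_one, List.map_map]
  apply List.ext_getElem
  · simp; omega
  · intro i h1 h2
    simp only [List.getElem_map, List.getElem_range, Function.comp_apply]
    rw [PySem.List.pyGetD_eq_getElem xs d (by simp at h1; omega) (by simp at h1; omega)]
    rw [List.getElem_take, List.getElem_drop]
    congr 1
    simp at h1
    omega

-- every char produced by Nat.toDigitsCore in base 2 is '0', '1', or comes from the accumulator
theorem toDigitsCore_mem (f : Nat) : ∀ (n : Nat) (l : List Char) (c : Char),
    c ∈ Nat.toDigitsCore 2 f n l → c = '0' ∨ c = '1' ∨ c ∈ l := by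
  induction f with
  | zero => intro n l c hc; exact Or.inr (Or.inr hc)
  | succ f ih =>
    intro n l c hc
    have hd : Nat.digitChar (n % 2) = '0' ∨ Nat.digitChar (n % 2) = '1' := by
      have : n % 2 = 0 ∨ n % 2 = 1 := by omega
      rcases this with h | h <;> simp [h, Nat.digitChar]
    simp only [Nat.toDigitsCore] at hc
    split at hc
    · rcases List.mem_cons.mp hc with h | h
      · rcases hd with h0 | h0 <;> [exact Or.inl (h ▸ h0); exact Or.inr (Or.inl (h ▸ h0))]
      · exact Or.inr (Or.inr h)
    · rcases ih (n / 2) _ c hc with h | h | h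
      · exact Or.inl h
      · exact Or.inr (Or.inl h)
      · rcases List.mem_cons.mp h with h0 | h0
        · rcases hd with h1 | h1 <;> [exact Or.inl (h0 ▸ h1); exact Or.inr (Or.inl (h0 ▸ h1))]
        · exact Or.inr (Or.inr h0)

theorem toDigitsCore_ne_nil (f : Nat) : ∀ (n : Nat) (l : List Char),
    l ≠ [] ∨ 0 < f → Nat.toDigitsCore 2 f n l ≠ [] := by
  induction f with
  | zero => intro n l h; simpa [Nat.toDigitsCore] using h.resolve_right (by omega)
  | succ f ih =>
    intro n l _
    simp only [Nat.toDigitsCore]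
    split
    · exact List.cons_ne_nil _ _
    · exact ih (n / 2) _ (Or.inl (List.cons_ne_nil _ _))

theorem toDigits_two (m : Nat) :
    ∃ c r, Nat.toDigits 2 m = c :: r ∧ c ≠ '+' ∧ c ≠ '-' := by
  have hne : Nat.toDigits 2 m ≠ [] := toDigitsCore_ne_nil (m + 1) m [] (Or.inr (by omega))
  obtain ⟨c, r, hcr⟩ := List.exists_cons_of_ne_nil hne
  refine ⟨c, r, hcr, ?_, ?_⟩ <;>
  · have hc : c ∈ Nat.toDigits 2 m := by rw [hcr]; exact List.mem_cons_self
    rcases toDigitsCore_mem (m + 1) m [] c hc with h | h | h <;> simp_all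
    
-- zfill on a sign-free string is left-padding with zeros
theorem zfill_eq (cs : List Char) (wl : Int) (hcs : ∃ c r, cs = c :: r ∧ c ≠ '+' ∧ c ≠ '-') :
    PySem.Chars.zfill cs wl = List.replicate (wl - cs.length).toNat '0' ++ cs := by
  obtain ⟨c, r, rfl, h1, h2⟩ := hcs
  by_cases hle : wl ≤ (((c :: r).length : Nat) : Int)
  · rw [PySem.Chars.zfill, if_pos hle, (by omega : (wl - ((c :: r).length : Int)).toNat = 0)]
    rfl
  · rw [PySem.Chars.zfill, if_neg hle]
    simp only [if_neg (by simp [h1, h2] : ¬(c = '+' ∨ c = '-'))]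
    have h3 : wl.toNat - (c :: r).length = (wl - ((c :: r).length : Int)).toNat := by omega
    rw [h3]

-- A's pad amount equals (-leng) % word_length
theorem pad_eq (leng wl : Int) (hwl : 1 ≤ wl) :
    (if PySem.Int.mod leng wl ≠ 0 then wl - PySem.Int.mod leng wl else 0)
      = PySem.Int.mod (-leng) wl := by
  rw [PySem.Int.mod_eq_emod_of_pos (a := leng) (by omega),
      PySem.Int.mod_eq_emod_of_pos (a := -leng) (by omega)]
  have h0 : 0 ≤ leng % wl := Int.emod_nonneg leng (by omega)
  have h1 : leng % wl < wl := Int.emod_lt_of_pos leng (by omega)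
  rw [Int.neg_emod]
  rcases eq_or_ne (leng % wl) 0 with h | h
  · rw [if_neg (by simpa using h), if_pos (Int.dvd_of_emod_eq_zero h)]
  · rw [if_pos (by simpa using h), if_neg (fun hd => h (Int.emod_eq_zero_of_dvd hd))]
    omega

theorem outer_loop (bs : List Char) (wl : Int) (hwl : 1 ≤ wl) (hdr : List Char) (N : Nat)
    (hN : ∀ k : Nat, k < N → wl * k < (bs.length : Int)) :
    ((List.range N).map (fun (k : Nat) => wl * (k : Int))).foldl
      (fun ws i =>
        (PySem.List.pyRange i (i + min wl ((bs.length : Int) - i)) 1).foldl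
          (fun ws' j => pyAddAt ws' (PySem.Int.floordiv i wl + 1)
            [PySem.List.pyGetD bs j ' ']) (ws ++ [[]])) [hdr]
    = hdr :: (List.range N).map (fun (k : Nat) => (bs.drop (wl * (k : Int)).toNat).take wl.toNat) := by
  induction N with
  | zero => simp
  | succ N ih =>
    rw [List.range_succ, List.map_append, List.foldl_append,
        ih (fun k hk => hN k (by omega))]
    simp only [List.map_cons, List.map_nil, List.foldl_cons, List.foldl_nil]
    have hlen : ((hdr :: (List.range N).map
        (fun (k : Nat) => (bs.drop (wl * (k : Int)).toNat).take wl.toNat)).length : Int) = (N : Int) + 1 := by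
      simp
    have hidx : PySem.Int.floordiv (wl * (N : Int)) wl + 1
        = ((hdr :: (List.range N).map
            (fun (k : Nat) => (bs.drop (wl * (k : Int)).toNat).take wl.toNat)).length : Int) := by
      rw [hlen, PySem.Int.floordiv_eq_ediv_of_pos (by omega), Int.mul_ediv_cancel_left _ (by omega)]
    rw [hidx, foldl_addAt_last]
    have hkN := hN N (by omega)
    have hbound : (0:Int) ≤ wl * (N : Int) := by positivity
    rw [seg_eq bs ' ' (wl * (N : Int)) (wl * (N : Int) + min wl ((bs.length : Int) - wl * (N : Int)))
        hbound (by omega)]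
    have htake : (bs.drop (wl * (N : Int)).toNat).take
          ((wl * (N : Int) + min wl ((bs.length : Int) - wl * (N : Int)) - wl * (N : Int)).toNat)
        = (bs.drop (wl * (N : Int)).toNat).take wl.toNat := by
      rw [List.take_eq_take_iff]
      simp only [List.length_drop]
      omega
    rw [htake]
    simp

theorem last_update (h : List Char) (l : List (List Char)) (x : List Char)
    (f : List Char → List Char) :
    (h :: (l ++ [x])).set (l.length + 1) (f ((h :: (l ++ [x])).getD (l.length + 1) []))
      = h :: (l ++ [f x]) := by
  have hg : (h :: (l ++ [x])).getD (l.length + 1) [] = x := by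
    simp [List.getD_eq_getElem?_getD]
  rw [hg, List.set_cons_succ, List.set_append_right _ _ (le_refl _)]
  simp

theorem rest_eq (bs : List Char) (wl : Int) (hwl : 1 ≤ wl) :
    (let leng : Int := (bs.length : Int)
     let zeros : List Char :=
       if PySem.Int.mod leng wl ≠ 0 then
         PySem.Int.toBinChars0b (wl - PySem.Int.mod leng wl)
       else PySem.Int.toBinChars0b 0
     let ws1 := (PySem.List.pyRange 0 (wl - (zeros.length : Int) + 2) 1).foldl
         (fun ws _ => pyAddAt ws 0 ['0']) [[]]
     let ws2 := (PySem.List.pyRange 2 (zeros.length : Int) 1).foldl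
         (fun ws i => pyAddAt ws 0 [PySem.List.pyGetD zeros i ' ']) ws1
     let ws3 := (PySem.List.pyRange 0 leng wl).foldl
         (fun ws i =>
           (PySem.List.pyRange i (i + min wl (leng - i)) 1).foldl
             (fun ws' j => pyAddAt ws' (PySem.Int.floordiv i wl + 1)
                [PySem.List.pyGetD bs j ' ']) (ws ++ [[]])) ws2
     let endi : Int := if PySem.Int.mod leng wl ≠ 0
         then PySem.Int.floordiv leng wl + 1 else PySem.Int.floordiv leng wl
     let ws4 := match PySem.List.pyIdx? ws3.length endi with
       | some k => ws3.set k (padZeros wl (ws3.getD k []))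
       | none => ws3
     ws4.map String.ofList)
    = (let padding : Int := PySem.Int.mod (-(bs.length : Int)) wl
       let header : List Char :=
         PySem.Chars.zfill (PySem.List.slice (PySem.Int.toBinChars0b padding) (some 2) none) wl
       let padded : List Char := bs ++ PySem.List.pyRepeat ['0'] padding
       let chunks := (PySem.List.pyRange 0 (padded.length : Int) wl).map
           (fun i => PySem.List.slice padded (some i) (some (i + wl)))
       (header :: chunks).map String.ofList) := by
  dsimp only
  have hL0 : (0:Int) ≤ (bs.length : Int) := by positivity
  set L : Int := (bs.length : Int) with hLdef
  set pad : Int := PySem.Int.mod (-L) wl with hpaddef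
  have hpad0 : 0 ≤ pad := PySem.Int.mod_nonneg _ (by omega)
  have hpadlt : pad < wl := PySem.Int.mod_lt _ (by omega)
  obtain ⟨c, r, hD, hc1, hc2⟩ := toDigits_two pad.toNat
  set D : List Char := Nat.toDigits 2 pad.toNat with hDdef
  -- A's zeros string is bin(pad)
  have hzeros : (if PySem.Int.mod L wl ≠ 0 then
        PySem.Int.toBinChars0b (wl - PySem.Int.mod L wl)
      else PySem.Int.toBinChars0b 0) = '0' :: 'b' :: D := by
    rw [← apply_ite PySem.Int.toBinChars0b, pad_eq L wl hwl, ← hpaddef,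
        PySem.Int.toBinChars0b, if_neg (by omega)]
  rw [hzeros]
  -- header: the two char-append loops produce zfill
  have h1 : (PySem.List.pyRange 0 (wl - (('0' :: 'b' :: D).length : Int) + 2) 1).foldl
      (fun ws _ => pyAddAt ws 0 ['0']) [[]]
      = [List.replicate (wl - (D.length : Int)).toNat '0'] := by
    have := foldl_addAt0 (PySem.List.pyRange 0 (wl - (('0' :: 'b' :: D).length : Int) + 2) 1)
      (fun _ => '0') []
    simp only [List.map_const', PySem.List.length_pyRange_one] at this
    rw [this]
    congr 2
    simp
    omega
  rw [h1]
  have h2 : (PySem.List.pyRange 2 ((('0' :: 'b' :: D).length : Nat) : Int) 1).foldl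
      (fun ws i => pyAddAt ws 0 [PySem.List.pyGetD ('0' :: 'b' :: D) i ' '])
      [List.replicate (wl - (D.length : Int)).toNat '0']
      = [List.replicate (wl - (D.length : Int)).toNat '0' ++ D] := by
    have := foldl_addAt0 (PySem.List.pyRange 2 ((('0' :: 'b' :: D).length : Nat) : Int) 1)
      (fun i => PySem.List.pyGetD ('0' :: 'b' :: D) i ' ')
      (List.replicate (wl - (D.length : Int)).toNat '0')
    rw [this, seg_eq ('0' :: 'b' :: D) ' ' 2 _ (by omega) (by simp)]
    simp
    omega
  rw [h2]
  -- the header produced by A equals B's zfill header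
  have hdrEq : PySem.Chars.zfill
      (PySem.List.slice (PySem.Int.toBinChars0b pad) (some 2) none) wl
      = List.replicate (wl - (D.length : Int)).toNat '0' ++ D := by
    rw [PySem.Int.toBinChars0b, if_neg (by omega)]
    have hsl : PySem.List.slice ('0' :: 'b' :: D) (some 2) none = D := by simp [pysem]
    rw [hsl, zfill_eq D wl ⟨c, r, hD, hc1, hc2⟩]
  rw [hdrEq]
  set hdr : List Char := List.replicate (wl - (D.length : Int)).toNat '0' ++ D with hhdr
  -- outer chunk loop: convert range(0, leng, word_length) to a mapped List.range
  rw [PySem.List.pyRange_of_pos 0 L (by omega : (0:Int) < wl)]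
  simp only [zero_add, Int.sub_zero]
  set N : Nat := (if (0:Int) < L then ((L + wl - 1) / wl).toNat else 0) with hNdef
  have hN : ∀ k : Nat, k < N → wl * (k : Int) < L := by
    intro k hk
    by_cases hLpos : (0:Int) < L
    · rw [hNdef, if_pos hLpos] at hk
      have ht : ((k:Int) + 1) ≤ (L + wl - 1) / wl := by omega
      have h2 : ((k:Int) + 1) * wl ≤ L + wl - 1 := (Int.le_ediv_iff_mul_le (by omega)).mp ht
      rw [show ((k:Int) + 1) * wl = wl * (k:Int) + wl from by ring] at h2
      linarith
    · rw [hNdef, if_neg hLpos] at hk; omega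
  rw [outer_loop bs wl hwl hdr N (by rw [hLdef] at hN; exact hN)]
  -- arithmetic: wl*N = L + pad, and A's end index is N
  have hq := Int.mul_ediv_add_emod L wl
  have hr0 : 0 ≤ L % wl := Int.emod_nonneg L (by omega)
  have hrw : L % wl < wl := Int.emod_lt_of_pos L (by omega)
  have hq0 : 0 ≤ L / wl := Int.ediv_nonneg hL0 (by omega)
  have hpadval : pad = if L % wl ≠ 0 then wl - L % wl else 0 := by
    rw [hpaddef, ← pad_eq L wl hwl, PySem.Int.mod_eq_emod_of_pos (a := L) (by omega)]
  have hdiv : (0:Int) < L → (L + wl - 1) / wl = (L % wl + wl - 1) / wl + L / wl := by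
    intro _
    rw [show L + wl - 1 = (L % wl + wl - 1) + wl * (L / wl) from by linarith,
        Int.add_mul_ediv_left _ _ (by omega)]
  have hkey : wl * (N : Int) = L + pad := by
    by_cases hLpos : (0:Int) < L
    · rw [hNdef, if_pos hLpos]
      by_cases hr : L % wl = 0
      · have hz : (L % wl + wl - 1) / wl = 0 := by
          rw [hr]; exact Int.ediv_eq_zero_of_lt (by omega) (by omega)
        rw [Int.toNat_of_nonneg (by rw [hdiv hLpos, hz]; omega), hdiv hLpos, hz, zero_add]
        rw [hpadval, if_neg (by simpa using hr)]
        linarith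
      · have hz : (L % wl + wl - 1) / wl = 1 := by
          rw [show L % wl + wl - 1 = (L % wl - 1) + wl * 1 from by ring,
              Int.add_mul_ediv_left _ _ (by omega),
              Int.ediv_eq_zero_of_lt (by omega) (by omega)]
          omega
        rw [Int.toNat_of_nonneg (by rw [hdiv hLpos, hz]; omega), hdiv hLpos, hz]
        rw [hpadval, if_pos (by simpa using hr)]
        have : wl * ((1:Int) + L / wl) = wl + wl * (L / wl) := by ring
        linarith
    · have hL00 : L = 0 := by omega
      rw [hNdef, if_neg hLpos, hpadval, hL00]
      simp
  have hendi : (if PySem.Int.mod L wl ≠ 0 then PySem.Int.floordiv L wl + 1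
      else PySem.Int.floordiv L wl) = (N : Int) := by
    rw [PySem.Int.mod_eq_emod_of_pos (a := L) (by omega),
        PySem.Int.floordiv_eq_ediv_of_pos (by omega : (0:Int) < wl)]
    by_cases hr : L % wl = 0
    · rw [if_neg (by simpa using hr)]
      have : pad = 0 := by rw [hpadval, if_neg (by simpa using hr)]
      have h2 : wl * (N:Int) = L := by omega
      have h3 : L / wl = (N:Int) := by
        rw [← h2, Int.mul_ediv_cancel_left _ (by omega : wl ≠ 0)]
      exact h3
    · rw [if_pos (by simpa using hr)]
      have hpv : pad = wl - L % wl := by rw [hpadval, if_pos (by simpa using hr)]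
      have h2 : wl * (N:Int) = wl * (L / wl) + wl := by omega
      have h3 : (N:Int) = L / wl + 1 := by
        have := Int.eq_of_mul_eq_mul_left (by omega : wl ≠ 0)
          (h2.trans (by ring : wl * (L / wl) + wl = wl * (L / wl + 1)))
        omega
      omega
  rw [hendi]
  set cA : Nat → List Char := fun k => (List.drop (wl * (k : Int)).toNat bs).take wl.toNat with hcA
  have hlen3 : (hdr :: (List.range N).map cA).length = N + 1 := by simp
  have hIdx : PySem.List.pyIdx? (hdr :: (List.range N).map cA).length ((N : Nat) : Int)
      = some N := by
    rw [hlen3]; simp [PySem.List.pyIdx?]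
  rw [hIdx]
  -- B side: length of the padded string and its range
  have hrep : PySem.List.pyRepeat ['0'] pad = List.replicate pad.toNat '0' :=
    PySem.List.pyRepeat_singleton '0' pad
  rw [hrep]
  have hplen : (((bs ++ List.replicate pad.toNat '0').length : Nat) : Int) = wl * (N : Int) := by
    simp only [List.length_append, List.length_replicate]
    push_cast
    omega
  rw [hplen, PySem.List.pyRange_of_pos 0 (wl * (N : Int)) (by omega : (0:Int) < wl)]
  simp only [zero_add, Int.sub_zero]
  have hN' : (if (0:Int) < wl * (N : Int) then ((wl * (N : Int) + wl - 1) / wl).toNat else 0)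
      = N := by
    by_cases hN0 : N = 0
    · rw [hN0]; simp
    · rw [if_pos (mul_pos (by omega : (0:Int) < wl)
          (by exact_mod_cast Nat.pos_of_ne_zero hN0 : (0:Int) < (N : Int)))]
      rw [show wl * (N : Int) + wl - 1 = (wl - 1) + wl * (N : Int) from by ring,
          Int.add_mul_ediv_left _ _ (by omega),
          Int.ediv_eq_zero_of_lt (by omega) (by omega)]
      omega
  rw [hN', List.map_map]
  rcases Nat.eq_zero_or_pos N with hN0 | hNpos
  · -- empty bit string: the trailing while loop finds the header already full length
    simp only [hN0, List.range_zero, List.map_nil]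
    rw [show ([hdr] : List (List Char)).getD 0 [] = hdr from rfl, padZeros_eq]
    have hhl : (wl - ((hdr.length : Nat) : Int)).toNat = 0 := by
      rw [hhdr]; simp only [List.length_append, List.length_replicate]; push_cast; omega
    rw [hhl]
    simp
  · obtain ⟨M, hM⟩ : ∃ M, N = M + 1 := ⟨N - 1, by omega⟩
    rw [hM] at hkey ⊢
    have hkM : wl * (M : Int) = L + pad - wl := by
      have h := hkey
      rw [show ((M + 1 : Nat) : Int) = (M : Int) + 1 from by push_cast; ring,
          mul_add, mul_one] at h
      linarith
    have hApos : (0:Int) ≤ wl * (M : Int) := by positivity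
    simp only [List.range_succ, List.map_append, List.map_cons, List.map_nil, Function.comp_def]
    have hml : ((List.range M).map cA).length = M := by simp
    have happ := last_update hdr ((List.range M).map cA) (cA M) (padZeros wl)
    rw [hml] at happ
    rw [happ]
    have hfront : ∀ k ∈ List.range M,
        PySem.List.slice (bs ++ List.replicate pad.toNat '0')
          (some (wl * (k : Int))) (some (wl * (k : Int) + wl)) = cA k := by
      intro k hk
      rw [List.mem_range] at hk
      have hk1 : wl * (k : Int) + wl ≤ wl * (M : Int) := by
        have h := mul_le_mul_of_nonneg_left
          (by exact_mod_cast hk : (k : Int) + 1 ≤ (M : Int)) (by omega : (0:Int) ≤ wl)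
        rw [mul_add, mul_one] at h
        linarith
      have hknn : (0:Int) ≤ wl * (k : Int) := by positivity
      rw [PySem.List.slice_toNat _ hknn (by omega),
          show (wl * (k : Int) + wl).toNat - (wl * (k : Int)).toNat = wl.toNat from by omega,
          List.drop_append_of_le_length (by omega : (wl * (k : Int)).toNat ≤ bs.length),
          List.take_append_of_le_length (by simp only [List.length_drop]; omega)]
    have hlastA : padZeros wl (cA M)
        = List.drop (wl * (M : Int)).toNat bs ++ List.replicate pad.toNat '0' := by
      rw [hcA]
      have htk : List.take wl.toNat (List.drop (wl * (M : Int)).toNat bs)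
          = List.drop (wl * (M : Int)).toNat bs :=
        List.take_of_length_le (by simp only [List.length_drop]; omega)
      show padZeros wl (List.take wl.toNat (List.drop (wl * (M : Int)).toNat bs)) = _
      rw [htk, padZeros_eq]
      congr 2
      simp only [List.length_drop]
      omega
    have hlastB : PySem.List.slice (bs ++ List.replicate pad.toNat '0')
        (some (wl * (M : Int))) (some (wl * (M : Int) + wl))
        = List.drop (wl * (M : Int)).toNat bs ++ List.replicate pad.toNat '0' := by
      rw [PySem.List.slice_toNat _ hApos (by omega),
          show (wl * (M : Int) + wl).toNat - (wl * (M : Int)).toNat = wl.toNat from by omega,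
          List.drop_append_of_le_length (by omega : (wl * (M : Int)).toNat ≤ bs.length)]
      exact List.take_of_length_le (by simp only [List.length_append, List.length_drop, List.length_replicate]; omega)
    rw [List.map_congr_left hfront, hlastA, hlastB]
    simp

theorem bin_char_eq (c : Char) :
    PySem.Chars.zfill
      (PySem.List.slice (PySem.Int.toBinChars0b (Int.ofNat c.toNat)) (some 2) none) 8
    = PySem.Chars.zfill (PySem.Int.toBinChars (Int.ofNat c.toNat)) 8 := by
  rw [PySem.Int.toBinChars0b, if_neg (by simp [Int.ofNat_eq_natCast]), PySem.Int.toBinChars, if_neg (by simp [Int.ofNat_eq_natCast])]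
  have hsl : PySem.List.slice ('0' :: 'b' :: Nat.toDigits 2 (Int.ofNat c.toNat).toNat)
      (some 2) none = Nat.toDigits 2 (Int.ofNat c.toNat).toNat := by simp [pysem]
  rw [hsl]

set_option maxHeartbeats 1600000 in
theorem string_formating_spec : Claim_equal_string_formating := by
  intro s wl _ hpre
  unfold Pre_string_formating at hpre
  unfold Spec_string_formating
  unfold string_formating string_formating_alt
  rw [show (fun (i : Char) => PySem.Chars.zfill
        (PySem.List.slice (PySem.Int.toBinChars0b (Int.ofNat i.toNat)) (some 2) none) 8)
      = (fun (c : Char) => PySem.Chars.zfill (PySem.Int.toBinChars (Int.ofNat c.toNat)) 8)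
      from funext bin_char_eq]
  generalize (s.toList.map
    (fun c => PySem.Chars.zfill (PySem.Int.toBinChars (Int.ofNat c.toNat)) 8)).flatten = bs
  exact rest_eq bs wl hpre

-- ===== VERDICT (by name: the statement is the Claim_ definition above) =====
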